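-- pv_equiv track=rewrite | github.com/qwattash/mpm | mpm/loaders.py | filter_empty_lines
-- ===== SOURCE A (Python) =====
-- def filter_empty_lines(value):
--     """
--     Remove empty lines to compact the text, multiple empty lines are
--     collapsed into a single empty line, single lines are removed.
--     Empty lines at the beginning and the end are stripped.
--
--     :param value: list of data strings
--     :type value: list
--     :return: the data list without empty lines
--     :rtype: list
--     """
--     filtered = []
--     empty_found = False
--     for line in value:
--         if line == "\n":
--             if not empty_found:
--                 filtered.append(line)
--                 empty_found = True
--         else:
--             empty_found = False
--             filtered.append(line)
--     # strip leading and trailing empty lines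
--     if len(filtered) > 0:
--         if filtered[0] == "\n":
--             del filtered[0]
--         if filtered[-1] == "\n":
--             del filtered[-1]
--     return filtered
-- ===== SOURCE B (Python) =====
-- def filter_empty_lines(value):
--     # Walk the list by maximal runs: a run of "\n" contributes a single "\n",
--     # a run of non-empty lines is copied as a whole slice.
--     filtered = []
--     i = 0
--     n = len(value)
--     while i < n:
--         if value[i] == "\n":
--             filtered.append("\n")
--             while i < n and value[i] == "\n":
--                 i += 1
--         else:
--             j = i
--             while j < n and value[j] != "\n":
--                 j += 1
--             filtered.extend(value[i:j])
--             i = j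
--     # strip leading and trailing empty lines
--     if filtered and filtered[0] == "\n":
--         del filtered[0]
--     if filtered and filtered[-1] == "\n":
--         del filtered[-1]
--     return filtered
-- ===== Notes on version B (the rewrite author's own statement) =====
-- stated objective: alternative
-- what changed: Replaces A's per-line loop with an empty_found state flag by a run-based traversal: an index walks maximal runs, emitting one "\n" per run of empty lines and copying a whole slice per run of non-empty lines, then strips the ends with two guarded deletes instead of A's unguarded index accesses.
-- outside the precondition, e.g. on filter_empty_lines(['\n', '\n']): A raises IndexError, B returns []
import Mathlib
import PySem

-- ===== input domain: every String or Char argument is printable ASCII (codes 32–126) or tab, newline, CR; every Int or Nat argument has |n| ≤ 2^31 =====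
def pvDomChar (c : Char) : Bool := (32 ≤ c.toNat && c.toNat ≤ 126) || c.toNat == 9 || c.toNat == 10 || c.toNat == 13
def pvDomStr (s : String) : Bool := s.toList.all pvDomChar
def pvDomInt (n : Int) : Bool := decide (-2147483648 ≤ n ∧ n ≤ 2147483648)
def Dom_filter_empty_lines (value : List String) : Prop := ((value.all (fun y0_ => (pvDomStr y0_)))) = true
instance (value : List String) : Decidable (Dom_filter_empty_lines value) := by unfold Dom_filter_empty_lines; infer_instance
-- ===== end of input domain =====

-- B walks the input by maximal runs (one "\n" per empty run, a whole slice per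
-- non-empty run) instead of A's per-line empty_found flag loop, and strips the
-- ends with guarded deletes; same return value on Pre_, and B returns [] where
-- A raises IndexError.

-- ===== PORT A =====
-- the for-loop, state (filtered, empty_found)
def pvStepA (st : List String × Bool) (line : String) : List String × Bool :=
  if line = "\n" then
    if !st.2 then (st.1 ++ [line], true) else st
  else (st.1 ++ [line], false)

def filter_empty_lines (value : List String) : List String :=
  let st := value.foldl pvStepA ([], false)
  let filtered := st.1
  if filtered.length > 0 then
    -- if filtered[0] == "\n": del filtered[0]
    let f1 := if PySem.List.pyGet? filtered 0 = some "\n" then filtered.tail else filtered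
    -- if filtered[-1] == "\n": del filtered[-1]   (IndexError when f1 = [], outside Pre_)
    match PySem.List.pyGet? f1 (-1) with
    | some x => if x = "\n" then f1.dropLast else f1
    | none => f1
  else filtered

-- ===== PORT B =====
-- the outer while-loop over maximal runs: the two inner while-loops advancing i/j
-- are the dropWhile / takeWhile+dropWhile of the current run
def pvRunsB : List String → List String
  | [] => []
  | x :: xs =>
    if x = "\n" then "\n" :: pvRunsB (xs.dropWhile (· = "\n"))
    else (x :: xs.takeWhile (· ≠ "\n")) ++ pvRunsB (xs.dropWhile (· ≠ "\n"))
termination_by l => l.length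
decreasing_by
  · exact Nat.lt_succ_of_le (xs.length_dropWhile_le _)
  · exact Nat.lt_succ_of_le (xs.length_dropWhile_le _)

def filter_empty_lines_alt (value : List String) : List String :=
  let filtered := pvRunsB value
  let f1 := if filtered.head? = some "\n" then filtered.tail else filtered
  if f1.getLast? = some "\n" then f1.dropLast else f1

-- ===== PRECONDITION & SPEC =====
-- Pre_ excludes exactly the inputs where A raises IndexError: non-empty lists whose
-- every element is "\n" (A strips the lone collapsed "\n" and then indexes filtered[-1]
-- on an empty list).
def Pre_filter_empty_lines (value : List String) : Prop :=
  value = [] ∨ ¬ (∀ l ∈ value, l = "\n")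
instance (value : List String) : Decidable (Pre_filter_empty_lines value) := by
  unfold Pre_filter_empty_lines; infer_instance
def pvWitness_filter_empty_lines : List String := ["a\n", "\n", "\n", "b\n"]

def Spec_filter_empty_lines (value : List String) (out : List String) : Prop := out = filter_empty_lines_alt value
instance (value : List String) (out : List String) : Decidable (Spec_filter_empty_lines value out) := by unfold Spec_filter_empty_lines; infer_instance

-- ===== CLAIM (what is proved, stated in full; the proofs are below) =====
def Claim_equal_filter_empty_lines : Prop := ∀ (value : List String), Dom_filter_empty_lines value → Pre_filter_empty_lines value → Spec_filter_empty_lines value (filter_empty_lines value)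

-- ===== LEMMAS AND PROOFS =====

-- reference collapsed form: colF flag l = what A's loop appends, flag = empty_found
def colF (flag : Bool) : List String → List String
  | [] => []
  | x :: xs =>
    if x = "\n" then
      if flag then colF true xs else "\n" :: colF true xs
    else x :: colF false xs

lemma foldA_eq (l : List String) : ∀ (acc : List String) (flag : Bool),
    (l.foldl pvStepA (acc, flag)).1 = acc ++ colF flag l := by
  induction l with
  | nil => intro acc flag; simp [colF]
  | cons x xs ih =>
    intro acc flag
    by_cases hx : x = "\n"
    · cases flag with
      | false => simp [pvStepA, hx, colF, ih]
      | true => simp [pvStepA, hx, colF, ih]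
    · simp [pvStepA, hx, colF, ih]

lemma colF_true_dropWhile (l : List String) :
    colF true l = colF false (l.dropWhile (· = "\n")) := by
  induction l with
  | nil => simp [colF]
  | cons x xs ih =>
    by_cases hx : x = "\n"
    · simp [colF, hx, ih]
    · simp [colF, hx]

lemma colF_false_take_drop (l : List String) :
    colF false l = l.takeWhile (· ≠ "\n") ++ colF false (l.dropWhile (· ≠ "\n")) := by
  induction l with
  | nil => simp [colF]
  | cons x xs ih =>
    by_cases hx : x = "\n"
    · simp [colF, hx]
    · simp only [colF, if_neg hx, List.takeWhile_cons, List.dropWhile_cons]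
      simp [hx, ih]

lemma runsB_eq (l : List String) : pvRunsB l = colF false l := by
  induction l using pvRunsB.induct with
  | case1 => simp [pvRunsB, colF]
  | case2 xs ih =>
    rw [pvRunsB]
    simp only [colF]
    rw [ih, ← colF_true_dropWhile]
    simp
  | case3 x xs hx ih =>
    rw [pvRunsB, if_neg hx]
    conv_rhs => rw [colF_false_take_drop]
    simp only [List.takeWhile_cons, List.dropWhile_cons, ne_eq, decide_not] at ih ⊢
    simp [hx, ih]

lemma strip_eq (f : List String) (hne : f ≠ [] → f ≠ ["\n"]) :
    (if f.length > 0 then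
      let f1 := if PySem.List.pyGet? f 0 = some "\n" then f.tail else f
      match PySem.List.pyGet? f1 (-1) with
      | some x => if x = "\n" then f1.dropLast else f1
      | none => f1
    else f)
    = (let f1 := if f.head? = some "\n" then f.tail else f
       if f1.getLast? = some "\n" then f1.dropLast else f1) := by
  cases f with
  | nil => simp
  | cons a t =>
    simp only [List.length_cons, gt_iff_lt, Nat.succ_pos,
      PySem.List.pyGet?_zero_cons, PySem.List.pyGet?_neg_one, List.head?_cons,
      Option.some.injEq, List.tail_cons]
    by_cases ha : a = "\n"
    · have ht : t ≠ [] := by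
        intro h; exact (hne (by simp) ) (by simp [ha, h])
      simp only [ha]
      cases hg : t.getLast? with
      | none => exact absurd (List.getLast?_eq_none_iff.mp hg) ht
      | some x => by_cases hx : x = "\n" <;> simp [hg, hx]
    · simp only [if_neg ha]
      cases hg : (a :: t).getLast? with
      | none => simp at hg
      | some x => by_cases hx : x = "\n" <;> simp [hg, hx]

-- colF true l = [] forces every element of l to be "\n"
lemma colF_true_nil_all (l : List String) (h : colF true l = []) :
    ∀ y ∈ l, y = "\n" := by
  induction l with
  | nil => simp
  | cons x xs ih =>
    by_cases hx : x = "\n"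
    · subst hx
      simp only [colF] at h
      intro y hy
      rcases List.mem_cons.mp hy with hy | hy
      · exact hy
      · exact ih h y hy
    · simp [colF, hx] at h

-- filtered = ["\n"] only when value is a non-empty all-"\n" list
lemma colF_singleton_nl (l : List String) (h : ¬ (∀ x ∈ l, x = "\n")) :
    colF false l ≠ ["\n"] := by
  induction l with
  | nil => simp at h
  | cons x xs ih =>
    by_cases hx : x = "\n"
    · subst hx
      have h' : ¬ (∀ y ∈ xs, y = "\n") := by
        intro hall; exact h (by simpa using hall)
      have hc : colF false ("\n" :: xs) = "\n" :: colF true xs := by simp [colF]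
      rw [hc]
      intro hcontra
      have hnil : colF true xs = [] := by simpa using hcontra
      exact h' (colF_true_nil_all xs hnil)
    · simp [colF, hx]

-- ===== VERDICT (by name: the statement is the Claim_ definition above) =====
theorem filter_empty_lines_spec : Claim_equal_filter_empty_lines := by
  intro value _ hp
  show filter_empty_lines value = filter_empty_lines_alt value
  have hA := foldA_eq value [] false
  simp only [List.nil_append] at hA
  have hne : colF false value ≠ [] → colF false value ≠ ["\n"] := by
    intro _
    rcases hp with hp | hp
    · subst hp; simp [colF]
    · exact colF_singleton_nl value hp
  have hs := strip_eq (colF false value) hne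
  simp only [filter_empty_lines, filter_empty_lines_alt, hA, runsB_eq]
  simpa using hs
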